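-- pv_equiv track=rewrite | github.com/benquick123/code-profiling | code/batch-2/vse-naloge-brez-testov/DN7-M-064.py | najvec_sosedov
-- ===== SOURCE A (Python) =====
-- def sosedov(x, y, mine):
--     """
--     Vrni število sosedov polja s koordinatami `(x, y)` na katerih je mina.
--     Polje samo ne šteje.
--
--     Args:
--         x (int): koordinata x
--         y (int): koordinata y
--         mine (set of tuple of int): koordinate min
--
--     Returns:
--         int: število sosedov
--     """
--     c = 0
--     for e in mine:
--         if e[0] + 1 == x and e[1] + 1 == y:
--             c += 1
--         if e[0] - 1 == x and e[1] - 1 == y: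
--             c += 1
--         if e[0] - 1 == x and e[1] + 1 == y:
--             c += 1
--         if e[0] + 1 == x and e[1] - 1 == y:
--             c += 1
--         if e[0] == x and e[1] + 1 == y:
--             c += 1
--         if e[0] + 1 == x and e[1] == y:
--             c += 1
--         if e[0] - 1 == x and e[1] == y:
--             c += 1
--         if e[0] == x and e[1] - 1 == y:
--             c += 1
--     return c
--
-- def najvec_sosedov(mine, s, v):
--     """
--     Vrni koordinati polja z največ sosednjih min
--
--     Args:
--         mine (set of (int, int)): koordinate min
--         s (int): širina polja
--         v (int): višina polja
--
--     Returns: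
--         tuple of int: koordinati polja
--
--     """
--     c = 0
--     t = (0,0)
--     for i in range(s):
--         for d in range(v):
--
--
--          if sosedov(i, d, mine) > c:
--              c = sosedov(i, d, mine)
--              t = (i, d)
--
--     return t
-- ===== SOURCE B (Python) =====
-- def najvec_sosedov(mine, s, v):
--     # Scatter-count: each mine adds 1 to each of its 8 neighbours; then pick the
--     # in-bounds cell with the highest count, lexicographically smallest on ties,
--     # (0, 0) if no cell has a positive count.
--     counts = {}
--     for (x, y) in mine:
--         for (dx, dy) in ((-1, -1), (-1, 0), (-1, 1), (0, -1), (0, 1), (1, -1), (1, 0), (1, 1)):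
--             p = (x + dx, y + dy)
--             counts[p] = counts.get(p, 0) + 1
--     best_c = 0
--     best_t = (0, 0)
--     for p, c in counts.items():
--         if 0 <= p[0] < s and 0 <= p[1] < v:
--             if c > best_c or (c == best_c and p < best_t):
--                 best_c = c
--                 best_t = p
--     return best_t
-- ===== Notes on version B (the rewrite author's own statement) =====
-- stated objective: faster
-- what changed: Instead of scanning every grid cell and recounting neighbouring mines per cell (O(s*v*|mine|)), B scatter-counts each mine's 8 neighbours into a dict once and then picks the in-bounds key with the highest count (lexicographically smallest on ties, (0,0) if none), in O(|mine|) time independent of the grid size.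
import Mathlib
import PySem

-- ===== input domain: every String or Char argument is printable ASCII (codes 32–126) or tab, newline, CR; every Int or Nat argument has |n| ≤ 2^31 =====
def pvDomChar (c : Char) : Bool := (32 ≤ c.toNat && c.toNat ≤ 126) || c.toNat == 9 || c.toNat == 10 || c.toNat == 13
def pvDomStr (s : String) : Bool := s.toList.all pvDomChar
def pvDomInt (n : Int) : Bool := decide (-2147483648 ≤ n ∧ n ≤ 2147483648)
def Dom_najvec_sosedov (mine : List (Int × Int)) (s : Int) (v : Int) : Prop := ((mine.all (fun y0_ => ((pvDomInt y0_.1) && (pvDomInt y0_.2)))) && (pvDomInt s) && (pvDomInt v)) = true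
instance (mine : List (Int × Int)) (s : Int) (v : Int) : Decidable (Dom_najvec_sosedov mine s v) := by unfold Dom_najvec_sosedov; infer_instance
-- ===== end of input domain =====

-- B scatter-counts each mine's 8 neighbours into a dict and picks the best in-bounds cell,
-- replacing A's full-grid rescan; measured asymptotically faster (O(|mine|) vs O(s*v*|mine|)).


-- ===== PORT A =====
def sosedov (x : Int) (y : Int) (mine : List (Int × Int)) : Int :=
  mine.foldl (fun c e =>
    let c := if e.1 + 1 = x ∧ e.2 + 1 = y then c + 1 else c
    let c := if e.1 - 1 = x ∧ e.2 - 1 = y then c + 1 else c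
    let c := if e.1 - 1 = x ∧ e.2 + 1 = y then c + 1 else c
    let c := if e.1 + 1 = x ∧ e.2 - 1 = y then c + 1 else c
    let c := if e.1 = x ∧ e.2 + 1 = y then c + 1 else c
    let c := if e.1 + 1 = x ∧ e.2 = y then c + 1 else c
    let c := if e.1 - 1 = x ∧ e.2 = y then c + 1 else c
    let c := if e.1 = x ∧ e.2 - 1 = y then c + 1 else c
    c) 0

def najvec_sosedov (mine : List (Int × Int)) (s : Int) (v : Int) : Int × Int :=
  ((PySem.List.pyRange 0 s).foldl (fun st i =>
    (PySem.List.pyRange 0 v).foldl (fun st d =>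
      if sosedov i d mine > st.1 then (sosedov i d mine, (i, d)) else st) st)
    ((0 : Int), ((0 : Int), (0 : Int)))).2

-- ===== PORT B =====
def pvOffsets : List (Int × Int) := [(-1, -1), (-1, 0), (-1, 1), (0, -1), (0, 1), (1, -1), (1, 0), (1, 1)]

def najvec_sosedov_alt (mine : List (Int × Int)) (s : Int) (v : Int) : Int × Int :=
  let counts : PySem.Dict (Int × Int) Int :=
    mine.foldl (fun d e =>
      pvOffsets.foldl (fun d o =>
        let p := (e.1 + o.1, e.2 + o.2)
        d.insert p (d.getD p 0 + 1)) d) PySem.Dict.empty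
  (counts.items.foldl (fun b pc =>
    if 0 ≤ pc.1.1 ∧ pc.1.1 < s ∧ (0 ≤ pc.1.2 ∧ pc.1.2 < v) then
      if pc.2 > b.1 ∨ (pc.2 = b.1 ∧ (pc.1.1 < b.2.1 ∨ (pc.1.1 = b.2.1 ∧ pc.1.2 < b.2.2))) then
        (pc.2, pc.1)
      else b
    else b)
    ((0 : Int), ((0 : Int), (0 : Int)))).2

-- ===== PRECONDITION & SPEC =====
def Spec_najvec_sosedov (mine : List (Int × Int)) (s : Int) (v : Int) (out : Int × Int) : Prop := out = najvec_sosedov_alt mine s v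
instance (mine : List (Int × Int)) (s : Int) (v : Int) (out : Int × Int) : Decidable (Spec_najvec_sosedov mine s v out) := by unfold Spec_najvec_sosedov; infer_instance

-- ===== CLAIM (what is proved, stated in full; the proofs are below) =====
def Claim_equal_najvec_sosedov : Prop := ∀ (mine : List (Int × Int)) (s : Int) (v : Int), Dom_najvec_sosedov mine s v → Spec_najvec_sosedov mine s v (najvec_sosedov mine s v)

-- ===== LEMMAS AND PROOFS =====

-- the 8 neighbour cells of a mine e, in B's offset order
def pvNbrs (e : Int × Int) : List (Int × Int) := pvOffsets.map (fun o => (e.1 + o.1, e.2 + o.2))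

-- strict lexicographic order on cells (Python's tuple <)
abbrev pvLexlt (p q : Int × Int) : Prop := p.1 < q.1 ∨ (p.1 = q.1 ∧ p.2 < q.2)

-- A's loop body, abstracted over the cell-value function f
def pvStepA (f : Int × Int → Int) (st : Int × (Int × Int)) (p : Int × Int) : Int × (Int × Int) :=
  if f p > st.1 then (f p, p) else st

-- B's loop body (without the in-bounds test), abstracted over f
def pvStepB (f : Int × Int → Int) (b : Int × (Int × Int)) (p : Int × Int) : Int × (Int × Int) :=
  if f p > b.1 ∨ (f p = b.1 ∧ pvLexlt p b.2) then (f p, p) else b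

-- the number of mines adjacent to a cell, as B counts them
def pvF (mine : List (Int × Int)) : Int × Int → Int := fun p => ((mine.flatMap pvNbrs).count p : Int)

-- the grid cells in the order A scans them
def pvGrid (s v : Int) : List (Int × Int) :=
  (PySem.List.pyRange 0 s).flatMap (fun i => (PySem.List.pyRange 0 v).map (fun d => (i, d)))

lemma pv_count_nbrs (e p : Int × Int) :
    ((pvNbrs e).count p : Int) =
      (if (e.1 + 1 = p.1 ∧ e.2 + 1 = p.2) ∨ (e.1 - 1 = p.1 ∧ e.2 - 1 = p.2) ∨
          (e.1 - 1 = p.1 ∧ e.2 + 1 = p.2) ∨ (e.1 + 1 = p.1 ∧ e.2 - 1 = p.2) ∨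
          (e.1 = p.1 ∧ e.2 + 1 = p.2) ∨ (e.1 + 1 = p.1 ∧ e.2 = p.2) ∨
          (e.1 - 1 = p.1 ∧ e.2 = p.2) ∨ (e.1 = p.1 ∧ e.2 - 1 = p.2) then 1 else 0) := by
  rcases e with ⟨a, b⟩
  rcases p with ⟨x, y⟩
  simp only [pvNbrs, pvOffsets, List.map, List.count_cons, List.count_nil,
    beq_iff_eq, Prod.mk.injEq]
  split_ifs <;> omega

set_option maxHeartbeats 2000000 in
lemma pv_step (x y : Int) (c : Int) (e : Int × Int) :
    (let c := if e.1 + 1 = x ∧ e.2 + 1 = y then c + 1 else c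
     let c := if e.1 - 1 = x ∧ e.2 - 1 = y then c + 1 else c
     let c := if e.1 - 1 = x ∧ e.2 + 1 = y then c + 1 else c
     let c := if e.1 + 1 = x ∧ e.2 - 1 = y then c + 1 else c
     let c := if e.1 = x ∧ e.2 + 1 = y then c + 1 else c
     let c := if e.1 + 1 = x ∧ e.2 = y then c + 1 else c
     let c := if e.1 - 1 = x ∧ e.2 = y then c + 1 else c
     let c := if e.1 = x ∧ e.2 - 1 = y then c + 1 else c
     c) = c + ((pvNbrs e).count (x, y) : Int) := by
  rw [pv_count_nbrs e (x, y)]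
  rcases e with ⟨a, b⟩
  dsimp only
  split_ifs <;> omega

lemma pv_sosedov_eq (mine : List (Int × Int)) (x y : Int) :
    sosedov x y mine = ((mine.flatMap pvNbrs).count (x, y) : Int) := by
  unfold sosedov
  suffices h : ∀ (c : Int), mine.foldl (fun c e =>
    let c := if e.1 + 1 = x ∧ e.2 + 1 = y then c + 1 else c
    let c := if e.1 - 1 = x ∧ e.2 - 1 = y then c + 1 else c
    let c := if e.1 - 1 = x ∧ e.2 + 1 = y then c + 1 else c
    let c := if e.1 + 1 = x ∧ e.2 - 1 = y then c + 1 else c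
    let c := if e.1 = x ∧ e.2 + 1 = y then c + 1 else c
    let c := if e.1 + 1 = x ∧ e.2 = y then c + 1 else c
    let c := if e.1 - 1 = x ∧ e.2 = y then c + 1 else c
    let c := if e.1 = x ∧ e.2 - 1 = y then c + 1 else c
    c) c = c + ((mine.flatMap pvNbrs).count (x, y) : Int) by
    simpa using h 0
  induction mine with
  | nil => simp
  | cons e t ih =>
    intro c
    rw [List.foldl_cons, ih, pv_step x y c e, List.flatMap_cons, List.count_append]
    push_cast
    ring

lemma pv_pyRange_sorted (a b : Int) : (PySem.List.pyRange a b).Pairwise (· < ·) := by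
  by_cases h : a < b
  · rw [PySem.List.pyRange_one_cons h]
    refine List.Pairwise.cons ?_ (pv_pyRange_sorted (a + 1) b)
    intro x hx
    have := PySem.List.mem_pyRange_one.mp hx
    omega
  · have : PySem.List.pyRange a b = [] := by
      rw [List.eq_nil_iff_forall_not_mem]
      intro x hx
      have := PySem.List.mem_pyRange_one.mp hx
      omega
    simp [this]
termination_by (b - a).toNat
decreasing_by omega

lemma pv_mem_grid (s v : Int) (p : Int × Int) :
    p ∈ pvGrid s v ↔ 0 ≤ p.1 ∧ p.1 < s ∧ (0 ≤ p.2 ∧ p.2 < v) := by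
  unfold pvGrid
  rcases p with ⟨x, y⟩
  simp only [List.mem_flatMap, List.mem_map, PySem.List.mem_pyRange_one, Prod.mk.injEq]
  constructor
  · rintro ⟨i, hi, d, hd, rfl, rfl⟩; omega
  · rintro ⟨h1, h2, h3, h4⟩; exact ⟨x, by omega, y, by omega, rfl, rfl⟩

lemma pv_grid_sorted (s v : Int) : (pvGrid s v).Pairwise pvLexlt := by
  unfold pvGrid
  have hI := pv_pyRange_sorted 0 s
  generalize PySem.List.pyRange 0 s = I at hI
  induction I with
  | nil => simp
  | cons i t ih =>
    rw [List.flatMap_cons]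
    rw [List.pairwise_append]
    refine ⟨?_, ih hI.of_cons, ?_⟩
    · refine List.pairwise_map.mpr ?_
      have := pv_pyRange_sorted 0 v
      exact this.imp (fun h => by right; exact ⟨rfl, h⟩)
    · intro x hx y hy
      rcases List.mem_map.mp hx with ⟨d, _, rfl⟩
      rcases List.mem_flatMap.mp hy with ⟨j, hj, hy2⟩
      rcases List.mem_map.mp hy2 with ⟨d', _, rfl⟩
      left
      exact (List.pairwise_cons.mp hI).1 j hj

lemma pv_foldl_stepA_filter (f : Int × Int → Int) (C : List (Int × Int)) :
    ∀ st : Int × (Int × Int), 0 ≤ st.1 →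
      C.foldl (pvStepA f) st = (C.filter (fun p => decide (0 < f p))).foldl (pvStepA f) st := by
  induction C with
  | nil => simp
  | cons p t ih =>
    intro st hst
    rw [List.foldl_cons, List.filter_cons]
    by_cases hp : 0 < f p
    · simp only [hp, decide_true, if_true, List.foldl_cons]
      apply ih
      unfold pvStepA
      split_ifs
      · simpa using hp.le
      · exact hst
    · have hA : pvStepA f st p = st := by
        unfold pvStepA; split_ifs with h; · exfalso; omega
        · rfl
      simp only [hp, decide_false, hA]
      exact ih st hst

lemma pv_fold_agree (f : Int × Int → Int) (C : List (Int × Int)) :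
    ∀ b : Int × (Int × Int), C.Pairwise pvLexlt → (∀ p ∈ C, 0 < f p) →
      (b.1 = 0 ∨ (0 < b.1 ∧ ∀ p ∈ C, pvLexlt b.2 p)) →
      C.foldl (pvStepA f) b = C.foldl (pvStepB f) b := by
  induction C with
  | nil => simp
  | cons p t ih =>
    intro b hsort hpos hinv
    have hstep : pvStepB f b p = pvStepA f b p := by
      unfold pvStepA pvStepB
      have hfp : 0 < f p := hpos p (List.mem_cons_self ..)
      split_ifs with h1 h2 h2 <;> try rfl
      · -- h1 : f p > b.1 ∨ tie, h2 : ¬ f p > b.1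
        exfalso
        rcases h1 with h | ⟨heq, hlex⟩
        · exact h2 h
        · rcases hinv with h0 | ⟨hb, hall⟩
          · omega
          · have := hall p (List.mem_cons_self ..)
            rcases hlex with hl | ⟨he, hl⟩ <;> rcases this with hl' | ⟨he', hl'⟩ <;> omega
      · exact absurd (Or.inl h2) h1
    rw [List.foldl_cons, List.foldl_cons, hstep]
    apply ih (pvStepA f b p) hsort.of_cons (fun q hq => hpos q (List.mem_cons_of_mem _ hq))
    unfold pvStepA
    split_ifs with h
    · right
      refine ⟨by simpa using hpos p (List.mem_cons_self ..), ?_⟩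
      intro q hq
      exact (List.pairwise_cons.mp hsort).1 q hq
    · rcases hinv with h0 | ⟨hb, hall⟩
      · left; exact h0
      · right; exact ⟨hb, fun q hq => hall q (List.mem_cons_of_mem _ hq)⟩

lemma pv_stepB_rcomm (f : Int × Int → Int) :
    ∀ (b : Int × (Int × Int)) (p q : Int × Int),
      pvStepB f (pvStepB f b p) q = pvStepB f (pvStepB f b q) p := by
  rintro ⟨c, t1, t2⟩ ⟨p1, p2⟩ ⟨q1, q2⟩
  unfold pvStepB
  generalize f (p1, p2) = fp
  generalize f (q1, q2) = fq
  dsimp only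
  split_ifs <;> simp_all [Prod.mk.injEq] <;> omega


lemma pv_A_eq (mine : List (Int × Int)) (s v : Int) :
    najvec_sosedov mine s v = ((pvGrid s v).foldl (pvStepA (pvF mine)) (0, (0, 0))).2 := by
  unfold najvec_sosedov pvGrid pvStepA pvF
  simp only [pv_sosedov_eq, List.foldl_flatMap, List.foldl_map]

lemma pv_B_eq (mine : List (Int × Int)) (s v : Int) :
    najvec_sosedov_alt mine s v =
      (((PySem.Set.ofList (mine.flatMap pvNbrs)).filter
          (fun k => decide (0 ≤ k.1 ∧ k.1 < s ∧ (0 ≤ k.2 ∧ k.2 < v)))).foldl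
        (pvStepB (pvF mine)) (0, (0, 0))).2 := by
  unfold najvec_sosedov_alt
  have h1 : ∀ (d : PySem.Dict (Int × Int) Int) (e : Int × Int),
      pvOffsets.foldl (fun d o =>
        d.insert (e.1 + o.1, e.2 + o.2) (d.getD (e.1 + o.1, e.2 + o.2) 0 + 1)) d
        = (pvNbrs e).foldl (fun d x => d.insert x (d.getD x 0 + 1)) d := by
    intro d e; rw [pvNbrs, List.foldl_map]
  have hd : mine.foldl (fun d e =>
      pvOffsets.foldl (fun d o =>
        d.insert (e.1 + o.1, e.2 + o.2) (d.getD (e.1 + o.1, e.2 + o.2) 0 + 1)) d)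
      PySem.Dict.empty = PySem.Dict.counter (mine.flatMap pvNbrs) := by
    simp only [h1]
    rw [← List.foldl_flatMap]
    exact PySem.Dict.foldl_insert_getD_add_one_eq_counter _
  dsimp only
  rw [hd, PySem.Dict.items_counter, List.foldl_map,
    ← PySem.List.foldl_ite_eq_foldl_filter
      (fun k : Int × Int => 0 ≤ k.1 ∧ k.1 < s ∧ (0 ≤ k.2 ∧ k.2 < v))
      (pvStepB (pvF mine))]
  rfl

lemma pv_lexlt_ne {p q : Int × Int} (h : pvLexlt p q) : p ≠ q := by
  rcases p with ⟨a, b⟩; rcases q with ⟨c, d⟩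
  simp only [Prod.mk.injEq, ne_eq, not_and]
  rcases h with h | ⟨h1, h2⟩ <;> omega

theorem pv_main (mine : List (Int × Int)) (s v : Int) :
    najvec_sosedov mine s v = najvec_sosedov_alt mine s v := by
  rw [pv_A_eq, pv_B_eq]
  have hG := pv_grid_sorted s v
  rw [pv_foldl_stepA_filter (pvF mine) _ (0, (0, 0)) (by norm_num)]
  have hsf : ((pvGrid s v).filter (fun p => decide (0 < pvF mine p))).Pairwise pvLexlt :=
    hG.filter _
  have hpf : ∀ p ∈ (pvGrid s v).filter (fun p => decide (0 < pvF mine p)), 0 < pvF mine p := by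
    intro p hp
    have := (List.mem_filter.mp hp).2
    simpa using this
  rw [pv_fold_agree (pvF mine) _ (0, (0, 0)) hsf hpf (Or.inl rfl)]
  have hnd1 : ((pvGrid s v).filter (fun p => decide (0 < pvF mine p))).Nodup :=
    (List.Pairwise.imp (fun h => pv_lexlt_ne h) hG).filter _
  have hnd2 : ((PySem.Set.ofList (mine.flatMap pvNbrs)).filter
      (fun k => decide (0 ≤ k.1 ∧ k.1 < s ∧ (0 ≤ k.2 ∧ k.2 < v)))).Nodup :=
    (PySem.Set.nodup_ofList _).filter _
  have hperm : ((pvGrid s v).filter (fun p => decide (0 < pvF mine p))).Perm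
      ((PySem.Set.ofList (mine.flatMap pvNbrs)).filter
        (fun k => decide (0 ≤ k.1 ∧ k.1 < s ∧ (0 ≤ k.2 ∧ k.2 < v)))) := by
    refine (List.perm_ext_iff_of_nodup hnd1 hnd2).mpr ?_
    intro p
    simp only [List.mem_filter, PySem.Set.mem_ofList, decide_eq_true_eq, pvF]
    rw [pv_mem_grid s v p]
    have hc : (0 : Int) < ((mine.flatMap pvNbrs).count p : Int) ↔ p ∈ mine.flatMap pvNbrs := by
      rw [← List.count_pos_iff]
      exact_mod_cast Iff.rfl
    constructor
    · rintro ⟨hb, hcnt⟩; exact ⟨hc.mp hcnt, hb⟩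
    · rintro ⟨hm, hb⟩; exact ⟨hb, hc.mpr hm⟩
  rw [@List.Perm.foldl_eq _ _ _ _ _ ⟨pv_stepB_rcomm (pvF mine)⟩ hperm (0, (0, 0))]

-- ===== VERDICT (by name: the statement is the Claim_ definition above) =====
theorem najvec_sosedov_spec : Claim_equal_najvec_sosedov := by
  intro mine s v _
  unfold Spec_najvec_sosedov
  exact pv_main mine s v
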